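-- pv_equiv track=rewrite | github.com/2719104587/Hallucination | hallucination/update_indel.py | update_force_idx
-- ===== SOURCE A (Python) =====
-- import copy
--
-- def update_force_idx(force_idx, sample_type, idxs):
--     if sample_type == "mut":
--         return force_idx
--     else:
--         force_idx_copy = copy.deepcopy(force_idx)
--         for idx in idxs:
--             for index, aa_idx in enumerate(force_idx):
--                 if aa_idx >= idx:
--                     if sample_type == "add":
--                         force_idx_copy[index] += 1
--                     elif sample_type == "pop":
--                         force_idx_copy[index] -= 1
--
--         return force_idx_copy
-- ===== SOURCE B (Python) =====
-- def _bisect_right(s, x):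
--     # hand-written bisect_right (A's module only imports copy, so no bisect import)
--     lo, hi = 0, len(s)
--     while lo < hi:
--         mid = (lo + hi) // 2
--         if s[mid] <= x:
--             lo = mid + 1
--         else:
--             hi = mid
--     return lo
--
--
-- def update_force_idx(force_idx, sample_type, idxs):
--     if sample_type == "mut":
--         return force_idx
--     delta = 1 if sample_type == "add" else (-1 if sample_type == "pop" else 0)
--     srt = sorted(idxs)
--     return [x + delta * _bisect_right(srt, x) for x in force_idx]
-- ===== Notes on version B (the rewrite author's own statement) =====
-- stated objective: faster
-- what changed: B sorts idxs once and, for each element of force_idx, binary-searches the count of idxs that are <= it, instead of A's nested pass over force_idx for every idx.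
import Mathlib
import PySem

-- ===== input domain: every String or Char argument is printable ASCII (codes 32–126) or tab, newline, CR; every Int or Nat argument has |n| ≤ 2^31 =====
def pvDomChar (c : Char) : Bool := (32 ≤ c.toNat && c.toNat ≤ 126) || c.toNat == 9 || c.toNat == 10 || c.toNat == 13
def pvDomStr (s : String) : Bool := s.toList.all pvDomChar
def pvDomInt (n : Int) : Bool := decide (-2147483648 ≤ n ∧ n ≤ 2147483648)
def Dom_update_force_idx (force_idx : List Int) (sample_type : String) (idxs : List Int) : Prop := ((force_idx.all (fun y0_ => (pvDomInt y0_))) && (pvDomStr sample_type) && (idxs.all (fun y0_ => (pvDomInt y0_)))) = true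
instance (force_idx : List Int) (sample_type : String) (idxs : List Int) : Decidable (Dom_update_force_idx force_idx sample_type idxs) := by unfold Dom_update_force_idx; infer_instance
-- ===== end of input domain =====

-- B sorts idxs once and binary-searches the count of idxs ≤ each element (objective: faster).


-- ===== PORT A =====
def update_force_idx (force_idx : List Int) (sample_type : String) (idxs : List Int) : List Int :=
  if sample_type = "mut" then force_idx
  else
    -- force_idx_copy = deepcopy(force_idx); nested for-loops mutating the copy
    idxs.foldl (fun c idx =>
      (PySem.List.enumerate force_idx 0).foldl (fun c p =>
        if p.2 ≥ idx then
          if sample_type = "add" then c.set p.1.toNat (c.getD p.1.toNat 0 + 1)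
          else if sample_type = "pop" then c.set p.1.toNat (c.getD p.1.toNat 0 - 1)
          else c
        else c) c) force_idx

-- ===== PORT B =====
-- hand-written bisect_right from Source B: while lo < hi: mid = (lo+hi)//2; …
def bisR (s : List Int) (x : Int) (lo hi : Nat) : Nat :=
  if _h : lo < hi then
    let mid := (lo + hi) / 2
    if s.getD mid 0 ≤ x then bisR s x (mid + 1) hi else bisR s x lo mid
  else lo
termination_by hi - lo
decreasing_by all_goals omega

def update_force_idx_alt (force_idx : List Int) (sample_type : String) (idxs : List Int) : List Int :=
  if sample_type = "mut" then force_idx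
  else
    let delta : Int := if sample_type = "add" then 1 else if sample_type = "pop" then -1 else 0
    let srt := PySem.List.sorted idxs (fun x => x) false
    force_idx.map (fun x => x + delta * (bisR srt x 0 srt.length : Int))

-- ===== PRECONDITION & SPEC =====
def Spec_update_force_idx (force_idx : List Int) (sample_type : String) (idxs : List Int) (out : List Int) : Prop := out = update_force_idx_alt force_idx sample_type idxs
instance (force_idx : List Int) (sample_type : String) (idxs : List Int) (out : List Int) : Decidable (Spec_update_force_idx force_idx sample_type idxs out) := by unfold Spec_update_force_idx; infer_instance

-- ===== CLAIM (what is proved, stated in full; the proofs are below) =====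
def Claim_equal_update_force_idx : Prop := ∀ (force_idx : List Int) (sample_type : String) (idxs : List Int), Dom_update_force_idx force_idx sample_type idxs → Spec_update_force_idx force_idx sample_type idxs (update_force_idx force_idx sample_type idxs)

-- ===== LEMMAS AND PROOFS =====

-- bisR maintains the classic binary-search invariant on a sorted list
theorem bisR_inv (s : List Int) (x : Int) (hs : s.Pairwise (· ≤ ·)) :
    ∀ (n lo hi : Nat), hi - lo ≤ n → lo ≤ hi → hi ≤ s.length →
      (∀ j, j < lo → (hj : j < s.length) → s[j] ≤ x) →
      (∀ j, hi ≤ j → (hj : j < s.length) → x < s[j]) →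
      bisR s x lo hi ≤ s.length ∧
      (∀ j, j < bisR s x lo hi → (hj : j < s.length) → s[j] ≤ x) ∧
      (∀ j, bisR s x lo hi ≤ j → (hj : j < s.length) → x < s[j]) := by
  have hmono : ∀ (i j : Nat) (hi : i < s.length) (hj : j < s.length), i ≤ j → s[i] ≤ s[j] := by
    intro i j hi hj hij
    rcases Nat.lt_or_ge i j with h | h
    · exact (List.pairwise_iff_getElem.mp hs) i j hi hj h
    · have : i = j := le_antisymm hij h
      subst this; exact le_refl _
  intro n
  induction n with
  | zero =>
    intro lo hi hn hlohi hhi hl hh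
    have : lo = hi := by omega
    subst this
    rw [bisR]
    simp only [lt_irrefl, dite_false]
    exact ⟨by omega, hl, hh⟩
  | succ n ih =>
    intro lo hi hn hlohi hhi hl hh
    rw [bisR]
    by_cases h : lo < hi
    · simp only [h, dite_true]
      set mid := (lo + hi) / 2 with hmid
      have hm1 : lo ≤ mid := by omega
      have hm2 : mid < hi := by omega
      have hmlt : mid < s.length := by omega
      have hgd : s.getD mid 0 = s[mid] := List.getD_eq_getElem s 0 hmlt
      by_cases hc : s.getD mid 0 ≤ x
      · simp only [hc, if_true]
        apply ih (mid + 1) hi (by omega) (by omega) hhi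
        · intro j hj hjl
          have : s[j] ≤ s[mid] := hmono j mid hjl hmlt (by omega)
          calc s[j] ≤ s[mid] := this
            _ = s.getD mid 0 := hgd.symm
            _ ≤ x := hc
        · exact hh
      · simp only [hc, if_false]
        apply ih lo mid (by omega) (by omega) (by omega) hl
        intro j hj hjl
        have : s[mid] ≤ s[j] := hmono mid j hmlt hjl hj
        have hx : x < s[mid] := by rw [← hgd]; omega
        omega
    · simp only [h, dite_false]
      have : lo = hi := by omega
      subst this
      exact ⟨by omega, hl, hh⟩

-- a split point characterises countP
theorem countP_of_split (p : Int → Bool) :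
    ∀ (s : List Int) (r : Nat), r ≤ s.length →
      (∀ j, j < r → (hj : j < s.length) → p s[j]) →
      (∀ j, r ≤ j → (hj : j < s.length) → ¬ p s[j]) →
      s.countP p = r := by
  intro s
  induction s with
  | nil =>
    intro r hr _ _
    have h0 : r = 0 := by simpa using hr
    simp [h0]
  | cons a t ih =>
    intro r hr h1 h2
    cases r with
    | zero =>
      have : ∀ y ∈ (a :: t), ¬ p y := by
        intro y hy
        obtain ⟨j, hj, hje⟩ := List.getElem_of_mem hy
        subst hje
        exact h2 j (Nat.zero_le j) hj
      simp [List.countP_eq_zero.mpr this]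
    | succ k =>
      have hpa : p a := h1 0 (Nat.succ_pos k) (by simp)
      have ht : t.countP p = k := by
        apply ih k (by simpa using hr)
        · intro j hj hjl
          have := h1 (j + 1) (by omega) (by simpa using Nat.succ_lt_succ hjl)
          simpa using this
        · intro j hj hjl
          have := h2 (j + 1) (by omega) (by simpa using Nat.succ_lt_succ hjl)
          simpa using this
      simp [hpa, ht]

-- on a sorted list, bisR over the whole range computes countP (· ≤ x)
theorem bisR_countP (s : List Int) (x : Int) (hs : s.Pairwise (· ≤ ·)) :
    (bisR s x 0 s.length : Nat) = s.countP (fun a => a ≤ x) := by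
  obtain ⟨h1, h2, h3⟩ := bisR_inv s x hs s.length 0 s.length (by omega) (by omega) (le_refl _)
    (by intro j hj _; omega) (by intro j hj hjl; omega)
  exact (countP_of_split (fun a => decide (a ≤ x)) s _ h1
    (fun j hj hjl => by simpa using h2 j hj hjl)
    (fun j hj hjl => by simpa using h3 j hj hjl)).symm

-- the generic inner pass (parameter d abstracts A's add/pop branches)
def innerStep (d idx : Int) (c : List Int) (p : Int × Int) : List Int :=
  if p.2 ≥ idx then c.set p.1.toNat (c.getD p.1.toNat 0 + d) else c

theorem getD_set_add (c : List Int) (s i : Nat) (v : Int) (hi : i < c.length) :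
    (c.set s v).getD i 0 = if i = s then v else c.getD i 0 := by
  have hi' : i < (c.set s v).length := by rw [List.length_set]; exact hi
  rw [List.getD_eq_getElem (c.set s v) 0 hi']
  rw [List.getElem_set]
  by_cases he : i = s
  · rw [if_pos he.symm, if_pos he]
  · rw [if_neg (fun h => he h.symm), if_neg he]
    exact (List.getD_eq_getElem c 0 hi).symm

theorem set_getD_self (c : List Int) (n : Nat) : c.set n (c.getD n 0) = c := by
  by_cases h : n < c.length
  · apply List.ext_getElem (by simp)
    intro i hi1 hi2
    rw [List.getElem_set]
    by_cases he : n = i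
    · rw [if_pos he]
      subst he
      exact List.getD_eq_getElem c 0 h
    · rw [if_neg he]
  · exact List.set_eq_of_length_le (by omega)

theorem inner_getD (d idx : Int) (fx : List Int) :
    ∀ (s : Nat) (c : List Int),
      ((PySem.List.enumerate fx (s : Int)).foldl (innerStep d idx) c).length = c.length ∧
      ∀ (i : Nat), i < c.length →
        ((PySem.List.enumerate fx (s : Int)).foldl (innerStep d idx) c).getD i 0 =
          c.getD i 0 + (if s ≤ i ∧ i - s < fx.length ∧ idx ≤ fx.getD (i - s) 0 then d else 0) := by
  induction fx with
  | nil =>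
    intro s c
    simp [PySem.List.enumerate_nil]
  | cons a t ih =>
    intro s c
    rw [PySem.List.enumerate_cons]
    simp only [List.foldl_cons]
    have hstep : innerStep d idx c ((s : Int), a) =
        (if a ≥ idx then c.set s (c.getD s 0 + d) else c) := by
      simp [innerStep]
    rw [hstep]
    have hcast : ((s : Int) + 1) = ((s + 1 : Nat) : Int) := by push_cast; ring
    rw [hcast]
    -- shift fact for the condition
    have hshift : ∀ i : Nat, ¬ i = s →
        ((s ≤ i ∧ i - s < (a :: t).length ∧ idx ≤ (a :: t).getD (i - s) 0) ↔
          (s + 1 ≤ i ∧ i - (s + 1) < t.length ∧ idx ≤ t.getD (i - (s + 1)) 0)) := by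
      intro i he
      constructor
      · rintro ⟨h1, h2, h3⟩
        have hgt : s < i := by omega
        have hrw : i - s = (i - (s + 1)) + 1 := by omega
        rw [hrw] at h2 h3
        simp only [List.getD_cons_succ] at h3
        simp only [List.length_cons] at h2
        exact ⟨by omega, by omega, h3⟩
      · rintro ⟨h1, h2, h3⟩
        have hrw : i - s = (i - (s + 1)) + 1 := by omega
        rw [hrw]
        simp only [List.getD_cons_succ, List.length_cons]
        exact ⟨by omega, by omega, h3⟩
    by_cases ha : a ≥ idx
    · simp only [ha, if_true]
      obtain ⟨ihlen, ihget⟩ := ih (s + 1) (c.set s (c.getD s 0 + d))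
      constructor
      · simpa using ihlen
      · intro i hi
        have hi' : i < (c.set s (c.getD s 0 + d)).length := by simpa using hi
        rw [ihget i hi', getD_set_add c s i _ hi]
        by_cases he : i = s
        · have hP : ¬ (s + 1 ≤ i ∧ i - (s + 1) < t.length ∧ idx ≤ t.getD (i - (s + 1)) 0) := by
            rintro ⟨h1, -, -⟩; omega
          have h0 : i - s = 0 := by omega
          have hQ : (s ≤ i ∧ i - s < (a :: t).length ∧ idx ≤ (a :: t).getD (i - s) 0) := by
            refine ⟨by omega, by simp [h0], ?_⟩
            rw [h0]
            simpa using ha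
          rw [if_pos he, if_neg hP, if_pos hQ, he]
          ring
        · rw [if_neg he]
          by_cases hp : (s + 1 ≤ i ∧ i - (s + 1) < t.length ∧ idx ≤ t.getD (i - (s + 1)) 0)
          · rw [if_pos hp, if_pos ((hshift i he).mpr hp)]
          · rw [if_neg hp, if_neg (fun h => hp ((hshift i he).mp h))]
    · simp only [ha, if_false]
      obtain ⟨ihlen, ihget⟩ := ih (s + 1) c
      refine ⟨ihlen, ?_⟩
      intro i hi
      rw [ihget i hi]
      congr 1
      by_cases he : i = s
      · have hP : ¬ (s + 1 ≤ i ∧ i - (s + 1) < t.length ∧ idx ≤ t.getD (i - (s + 1)) 0) := by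
          rintro ⟨h1, -, -⟩; omega
        have h0 : i - s = 0 := by omega
        have hQ : ¬ (s ≤ i ∧ i - s < (a :: t).length ∧ idx ≤ (a :: t).getD (i - s) 0) := by
          rintro ⟨-, -, h3⟩
          rw [h0] at h3
          simp only [List.getD_cons_zero] at h3
          omega
        rw [if_neg hQ, if_neg hP]
      · by_cases hp : (s + 1 ≤ i ∧ i - (s + 1) < t.length ∧ idx ≤ t.getD (i - (s + 1)) 0)
        · rw [if_pos hp, if_pos ((hshift i he).mpr hp)]
        · rw [if_neg hp, if_neg (fun h => hp ((hshift i he).mp h))]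

-- the outer loop accumulates d * (count of idxs ≤ fx[i]) at each position
theorem outer_getD (d : Int) (fx : List Int) :
    ∀ (idxs : List Int) (c : List Int), c.length = fx.length →
      (idxs.foldl (fun c idx => (PySem.List.enumerate fx 0).foldl (innerStep d idx) c) c).length = fx.length ∧
      ∀ (i : Nat), i < fx.length →
        (idxs.foldl (fun c idx => (PySem.List.enumerate fx 0).foldl (innerStep d idx) c) c).getD i 0 =
          c.getD i 0 + d * (idxs.countP (fun t => t ≤ fx.getD i 0) : Int) := by
  intro idxs
  induction idxs with
  | nil =>
    intro c hc
    refine ⟨hc, ?_⟩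
    intro i hi
    simp
  | cons idx rest ih =>
    intro c hc
    simp only [List.foldl_cons]
    have h0 : ((0 : Int)) = ((0 : Nat) : Int) := rfl
    obtain ⟨hlen, hget⟩ := by
      have := inner_getD d idx fx 0 c
      rwa [← h0] at this
    obtain ⟨ihlen, ihget⟩ := ih ((PySem.List.enumerate fx 0).foldl (innerStep d idx) c) (by omega)
    refine ⟨ihlen, ?_⟩
    intro i hi
    rw [ihget i hi, hget i (by omega)]
    by_cases hcase : idx ≤ fx.getD i 0
    · have hcond : ((0:Nat) ≤ i ∧ i - 0 < fx.length ∧ idx ≤ fx.getD (i - 0) 0) := by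
        exact ⟨Nat.zero_le i, by omega, by simpa using hcase⟩
      rw [if_pos hcond]
      simp only [List.countP_cons, hcase, decide_true, if_true]
      push_cast
      ring
    · have hcond : ¬ ((0:Nat) ≤ i ∧ i - 0 < fx.length ∧ idx ≤ fx.getD (i - 0) 0) := by
        rintro ⟨-, -, h3⟩
        simp only [Nat.sub_zero] at h3
        exact hcase h3
      rw [if_neg hcond]
      norm_num [List.countP_cons, hcase]
      exact Or.inl (by rw [← List.getD_eq_getElem?_getD]; omega)

-- ===== VERDICT (by name: the statement is the Claim_ definition above) =====
theorem update_force_idx_spec : Claim_equal_update_force_idx := by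
  intro fx st idxs _
  unfold Spec_update_force_idx update_force_idx update_force_idx_alt
  by_cases hmut : st = "mut"
  · simp [hmut]
  · simp only [hmut, if_false]
    set d : Int := if st = "add" then 1 else if st = "pop" then -1 else 0 with hd
    set srt := PySem.List.sorted idxs (fun x => x) false with hsrt
    have hsorted : srt.Pairwise (· ≤ ·) := PySem.List.sorted_pairwise idxs (fun x => x)
    have hperm : srt.Perm idxs := PySem.List.sorted_perm idxs (fun x => x) false
    -- A's branch-laden inner step IS innerStep with this d
    have hg : ∀ idx : Int, (fun (c : List Int) (p : Int × Int) =>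
        if p.2 ≥ idx then
          if st = "add" then c.set p.1.toNat (c.getD p.1.toNat 0 + 1)
          else if st = "pop" then c.set p.1.toNat (c.getD p.1.toNat 0 - 1)
          else c
        else c) = innerStep d idx := by
      intro idx
      funext c p
      simp only [innerStep, hd]
      by_cases h1 : p.2 ≥ idx
      · simp only [h1, if_true]
        by_cases h2 : st = "add"
        · simp [h2]
        · by_cases h3 : st = "pop"
          · simp [h3, sub_eq_add_neg]
          · simp only [h2, h3, if_false, add_zero]
            exact (set_getD_self c p.1.toNat).symm
      · simp [h1]
    simp only [hg]
    obtain ⟨hlen, hget⟩ := outer_getD d fx idxs fx rfl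
    apply List.ext_getElem
    · simpa using hlen
    · intro i hi1 hi2
      have hif : i < fx.length := by omega
      have h1 : (idxs.foldl (fun c idx => (PySem.List.enumerate fx 0).foldl (innerStep d idx) c) fx)[i] =
          (idxs.foldl (fun c idx => (PySem.List.enumerate fx 0).foldl (innerStep d idx) c) fx).getD i 0 :=
        (List.getD_eq_getElem _ 0 hi1).symm
      rw [h1, hget i hif]
      have h2 : (fx.map (fun x => x + d * (bisR srt x 0 srt.length : Int)))[i] =
          fx[i] + d * (bisR srt (fx[i]) 0 srt.length : Int) := by
        simp
      rw [h2, bisR_countP srt (fx[i]) hsorted, hperm.countP_eq]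
      rw [List.getD_eq_getElem fx 0 hif]
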